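-- pv_equiv track=rewrite | github.com/ProPain03/SketchReal | src/inference_engine.py | are_similar_classes
-- ===== SOURCE A (Python) =====
-- def are_similar_classes(class1: str, class2: str) -> bool:
--     """Check if two class names represent similar UI elements"""
--     similarity_groups = [
--         {'Text', 'Label', 'Text Button', 'Link'},
--         {'Image', 'Background Image', 'Background', 'Icon'},
--         {'Input Field', 'Search Box', 'Text Input'},
--         {'Button', 'Text Button', 'Icon Button'},
--         {'Other', 'Unknown', 'Misc'}
--     ]
--
--     # Normalize class names
--     class1_norm = class1.lower().strip()
--     class2_norm = class2.lower().strip()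
--
--     # Check if they're in the same similarity group
--     for group in similarity_groups:
--         group_lower = {cls.lower() for cls in group}
--         if class1_norm in group_lower and class2_norm in group_lower:
--             return True
--
--     # Check for partial matches
--     if 'text' in class1_norm and 'text' in class2_norm:
--         return True
--     if 'image' in class1_norm and 'image' in class2_norm:
--         return True
--     if 'button' in class1_norm and 'button' in class2_norm:
--         return True
--
--     return False
-- ===== SOURCE B (Python) =====
-- def are_similar_classes(class1: str, class2: str) -> bool:
--     """Check if two class names represent similar UI elements"""
--     similarity_groups = [
--         {'Text', 'Label', 'Text Button', 'Link'},
--         {'Image', 'Background Image', 'Background', 'Icon'},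
--         {'Input Field', 'Search Box', 'Text Input'},
--         {'Button', 'Text Button', 'Icon Button'},
--         {'Other', 'Unknown', 'Misc'}
--     ]
--
--     def features(name):
--         """All similarity features of a name: indices of the groups it belongs
--         to, plus each keyword it contains (ints and strings never collide)."""
--         n = name.lower().strip()
--         feats = {i for i, group in enumerate(similarity_groups)
--                  if n in {cls.lower() for cls in group}}
--         for word in ('text', 'image', 'button'):
--             if word in n:
--                 feats.add(word)
--         return feats
--
--     # Similar iff the two names share at least one feature.
--     return bool(features(class1) & features(class2))
-- ===== Notes on version B (the rewrite author's own statement) =====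
-- stated objective: alternative
-- what changed: B computes one feature set per name (indices of the groups containing it plus the keywords 'text'/'image'/'button' it contains) and decides similarity by a single set intersection, replacing A's early-return scan over the groups followed by three pairwise substring branches.
import Mathlib
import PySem

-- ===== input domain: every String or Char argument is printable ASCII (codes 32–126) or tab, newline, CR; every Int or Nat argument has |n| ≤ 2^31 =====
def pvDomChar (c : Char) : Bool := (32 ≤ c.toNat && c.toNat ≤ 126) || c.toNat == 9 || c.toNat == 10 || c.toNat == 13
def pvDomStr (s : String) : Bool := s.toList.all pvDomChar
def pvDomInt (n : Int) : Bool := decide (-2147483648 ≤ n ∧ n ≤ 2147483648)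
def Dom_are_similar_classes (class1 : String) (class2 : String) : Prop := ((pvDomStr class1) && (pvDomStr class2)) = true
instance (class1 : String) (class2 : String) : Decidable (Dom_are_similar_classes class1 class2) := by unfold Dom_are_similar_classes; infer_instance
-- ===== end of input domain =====

-- B replaces A's early-return group scan followed by three pairwise substring
-- branches with a single mechanism: compute the FEATURE SET of each name
-- (indices of groups containing it plus the keywords it contains) and decide by
-- one set intersection ('alternative' objective, no speed claim).

-- ===== PORT A =====
-- the 'for group in similarity_groups: …' loop (early return on a match)
def pvGroupLoop : List (PySem.Set String) → String → String → Bool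
  | [], _, _ => false
  | g :: rest, c1, c2 =>
    let group_lower : PySem.Set String := PySem.Set.ofList (g.map PySem.Str.lower)
    if group_lower.contains c1 && group_lower.contains c2 then true
    else pvGroupLoop rest c1 c2

def are_similar_classes (class1 : String) (class2 : String) : Bool :=
  let similarity_groups : List (PySem.Set String) :=
    [PySem.Set.ofList ["Text", "Label", "Text Button", "Link"],
     PySem.Set.ofList ["Image", "Background Image", "Background", "Icon"],
     PySem.Set.ofList ["Input Field", "Search Box", "Text Input"],
     PySem.Set.ofList ["Button", "Text Button", "Icon Button"],
     PySem.Set.ofList ["Other", "Unknown", "Misc"]]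
  let class1_norm := PySem.Str.strip (PySem.Str.lower class1)
  let class2_norm := PySem.Str.strip (PySem.Str.lower class2)
  if pvGroupLoop similarity_groups class1_norm class2_norm then true
  else if PySem.Str.isIn "text" class1_norm && PySem.Str.isIn "text" class2_norm then true
  else if PySem.Str.isIn "image" class1_norm && PySem.Str.isIn "image" class2_norm then true
  else if PySem.Str.isIn "button" class1_norm && PySem.Str.isIn "button" class2_norm then true
  else false

-- ===== PORT B =====
-- a feature is either a group index (Python int) or a contained keyword (Python str);
-- Python's mixed set {int, str} never equates the two kinds, exactly like this sum type
inductive Feat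
  | grp : Int → Feat
  | tag : String → Feat
deriving DecidableEq, Repr

-- features(name): '{i for i, group in enumerate(groups) if n in {cls.lower() for cls in group}}'
-- then 'for word in (...): if word in n: feats.add(word)'
def pvFeatures (similarity_groups : List (PySem.Set String)) (name : String) : PySem.Set Feat :=
  let n := PySem.Str.strip (PySem.Str.lower name)
  let feats : PySem.Set Feat := PySem.Set.ofList
    (((PySem.List.enumerate similarity_groups 0).filter
        (fun p => (PySem.Set.ofList (p.2.map PySem.Str.lower)).contains n)).map
      (fun p => Feat.grp p.1))
  ["text", "image", "button"].foldl
    (fun feats word =>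
      if PySem.Str.isIn word n then PySem.Set.add feats (Feat.tag word) else feats)
    feats

def are_similar_classes_alt (class1 : String) (class2 : String) : Bool :=
  let similarity_groups : List (PySem.Set String) :=
    [PySem.Set.ofList ["Text", "Label", "Text Button", "Link"],
     PySem.Set.ofList ["Image", "Background Image", "Background", "Icon"],
     PySem.Set.ofList ["Input Field", "Search Box", "Text Input"],
     PySem.Set.ofList ["Button", "Text Button", "Icon Button"],
     PySem.Set.ofList ["Other", "Unknown", "Misc"]]
  -- similar iff the two names share at least one feature
  !(PySem.Set.inter (pvFeatures similarity_groups class1)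
      (pvFeatures similarity_groups class2)).isEmpty

-- ===== PRECONDITION & SPEC =====
def Spec_are_similar_classes (class1 : String) (class2 : String) (out : Bool) : Prop := out = are_similar_classes_alt class1 class2
instance (class1 : String) (class2 : String) (out : Bool) : Decidable (Spec_are_similar_classes class1 class2 out) := by unfold Spec_are_similar_classes; infer_instance

-- ===== CLAIM (what is proved, stated in full; the proofs are below) =====
def Claim_equal_are_similar_classes : Prop := ∀ (class1 : String) (class2 : String), Dom_are_similar_classes class1 class2 → Spec_are_similar_classes class1 class2 (are_similar_classes class1 class2)

-- ===== LEMMAS AND PROOFS =====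
-- The 16 distinct lowercased member names, in group order.
def pvNames : List String := ["text","label","text button","link","image","background image","background","icon","input field","search box","text input","button","icon button","other","unknown","misc"]
-- classify a string by which member name (if any) it equals (16 = none of them)
def pvCode (a : String) : Nat := pvNames.idxOf a
-- group-index sets by name code
def pvTbl : List (List Int) := [[0],[0],[0,3],[0],[1],[1],[1],[1],[2],[2],[2],[3],[3],[4],[4],[4]]
def pvLook (x : Nat) : List Int := pvTbl.getD x []
-- B's feature set as a function of the name code and the three keyword flags
def pvFeat (x : Nat) (t i b : Bool) : PySem.Set Feat :=
  let f : PySem.Set Feat := PySem.Set.ofList ((pvLook x).map Feat.grp)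
  let f := if t then PySem.Set.add f (Feat.tag "text") else f
  let f := if i then PySem.Set.add f (Feat.tag "image") else f
  if b then PySem.Set.add f (Feat.tag "button") else f

lemma pvCode_le (a : String) : pvCode a ≤ 16 := by
  have := List.idxOf_le_length (a := a) (l := pvNames)
  simpa [pvCode, pvNames] using this

lemma pvCode_eq_imp (a : String) (i : Nat) (h : i < 16) (hc : pvCode a = i) :
    pvNames[i]'(by simpa [pvNames] using h) = a := by
  subst hc
  exact List.getElem_idxOf (by simpa [pvNames] using h)

lemma pvEq0 (a : String) : (a == "text") = (pvCode a == 0) := by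
  by_cases h : a = "text"
  · subst h; decide
  · have h2 : pvCode a ≠ 0 := fun hc => h ((pvCode_eq_imp a 0 (by omega) hc).symm)
    simp [h, h2]

lemma pvEq1 (a : String) : (a == "label") = (pvCode a == 1) := by
  by_cases h : a = "label"
  · subst h; decide
  · have h2 : pvCode a ≠ 1 := fun hc => h ((pvCode_eq_imp a 1 (by omega) hc).symm)
    simp [h, h2]

lemma pvEq2 (a : String) : (a == "text button") = (pvCode a == 2) := by
  by_cases h : a = "text button"
  · subst h; decide
  · have h2 : pvCode a ≠ 2 := fun hc => h ((pvCode_eq_imp a 2 (by omega) hc).symm)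
    simp [h, h2]

lemma pvEq3 (a : String) : (a == "link") = (pvCode a == 3) := by
  by_cases h : a = "link"
  · subst h; decide
  · have h2 : pvCode a ≠ 3 := fun hc => h ((pvCode_eq_imp a 3 (by omega) hc).symm)
    simp [h, h2]

lemma pvEq4 (a : String) : (a == "image") = (pvCode a == 4) := by
  by_cases h : a = "image"
  · subst h; decide
  · have h2 : pvCode a ≠ 4 := fun hc => h ((pvCode_eq_imp a 4 (by omega) hc).symm)
    simp [h, h2]

lemma pvEq5 (a : String) : (a == "background image") = (pvCode a == 5) := by
  by_cases h : a = "background image"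
  · subst h; decide
  · have h2 : pvCode a ≠ 5 := fun hc => h ((pvCode_eq_imp a 5 (by omega) hc).symm)
    simp [h, h2]

lemma pvEq6 (a : String) : (a == "background") = (pvCode a == 6) := by
  by_cases h : a = "background"
  · subst h; decide
  · have h2 : pvCode a ≠ 6 := fun hc => h ((pvCode_eq_imp a 6 (by omega) hc).symm)
    simp [h, h2]

lemma pvEq7 (a : String) : (a == "icon") = (pvCode a == 7) := by
  by_cases h : a = "icon"
  · subst h; decide
  · have h2 : pvCode a ≠ 7 := fun hc => h ((pvCode_eq_imp a 7 (by omega) hc).symm)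
    simp [h, h2]

lemma pvEq8 (a : String) : (a == "input field") = (pvCode a == 8) := by
  by_cases h : a = "input field"
  · subst h; decide
  · have h2 : pvCode a ≠ 8 := fun hc => h ((pvCode_eq_imp a 8 (by omega) hc).symm)
    simp [h, h2]

lemma pvEq9 (a : String) : (a == "search box") = (pvCode a == 9) := by
  by_cases h : a = "search box"
  · subst h; decide
  · have h2 : pvCode a ≠ 9 := fun hc => h ((pvCode_eq_imp a 9 (by omega) hc).symm)
    simp [h, h2]

lemma pvEq10 (a : String) : (a == "text input") = (pvCode a == 10) := by
  by_cases h : a = "text input"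
  · subst h; decide
  · have h2 : pvCode a ≠ 10 := fun hc => h ((pvCode_eq_imp a 10 (by omega) hc).symm)
    simp [h, h2]

lemma pvEq11 (a : String) : (a == "button") = (pvCode a == 11) := by
  by_cases h : a = "button"
  · subst h; decide
  · have h2 : pvCode a ≠ 11 := fun hc => h ((pvCode_eq_imp a 11 (by omega) hc).symm)
    simp [h, h2]

lemma pvEq12 (a : String) : (a == "icon button") = (pvCode a == 12) := by
  by_cases h : a = "icon button"
  · subst h; decide
  · have h2 : pvCode a ≠ 12 := fun hc => h ((pvCode_eq_imp a 12 (by omega) hc).symm)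
    simp [h, h2]

lemma pvEq13 (a : String) : (a == "other") = (pvCode a == 13) := by
  by_cases h : a = "other"
  · subst h; decide
  · have h2 : pvCode a ≠ 13 := fun hc => h ((pvCode_eq_imp a 13 (by omega) hc).symm)
    simp [h, h2]

lemma pvEq14 (a : String) : (a == "unknown") = (pvCode a == 14) := by
  by_cases h : a = "unknown"
  · subst h; decide
  · have h2 : pvCode a ≠ 14 := fun hc => h ((pvCode_eq_imp a 14 (by omega) hc).symm)
    simp [h, h2]

lemma pvEq15 (a : String) : (a == "misc") = (pvCode a == 15) := by
  by_cases h : a = "misc"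
  · subst h; decide
  · have h2 : pvCode a ≠ 15 := fun hc => h ((pvCode_eq_imp a 15 (by omega) hc).symm)
    simp [h, h2]

-- B's feature builder, characterised by pvCode and the three keyword flags
lemma pvFeatures_eq (name : String) :
    pvFeatures
      [PySem.Set.ofList ["Text", "Label", "Text Button", "Link"],
       PySem.Set.ofList ["Image", "Background Image", "Background", "Icon"],
       PySem.Set.ofList ["Input Field", "Search Box", "Text Input"],
       PySem.Set.ofList ["Button", "Text Button", "Icon Button"],
       PySem.Set.ofList ["Other", "Unknown", "Misc"]] name =
    pvFeat (pvCode (PySem.Str.strip (PySem.Str.lower name)))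
      (PySem.Str.isIn "text" (PySem.Str.strip (PySem.Str.lower name)))
      (PySem.Str.isIn "image" (PySem.Str.strip (PySem.Str.lower name)))
      (PySem.Str.isIn "button" (PySem.Str.strip (PySem.Str.lower name))) := by
  generalize hn : PySem.Str.strip (PySem.Str.lower name) = n
  have hx := pvCode_le n
  have e0 : PySem.Set.ofList ((PySem.Set.ofList ["Text", "Label", "Text Button", "Link"]).map PySem.Str.lower) = ["text","label","text button","link"] := by decide
  have e1 : PySem.Set.ofList ((PySem.Set.ofList ["Image", "Background Image", "Background", "Icon"]).map PySem.Str.lower) = ["image","background image","background","icon"] := by decide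
  have e2 : PySem.Set.ofList ((PySem.Set.ofList ["Input Field", "Search Box", "Text Input"]).map PySem.Str.lower) = ["input field","search box","text input"] := by decide
  have e3 : PySem.Set.ofList ((PySem.Set.ofList ["Button", "Text Button", "Icon Button"]).map PySem.Str.lower) = ["button","text button","icon button"] := by decide
  have e4 : PySem.Set.ofList ((PySem.Set.ofList ["Other", "Unknown", "Misc"]).map PySem.Str.lower) = ["other","unknown","misc"] := by decide
  simp only [pvFeatures, hn, PySem.List.enumerate_cons, PySem.List.enumerate_nil,
    List.filter, List.foldl, e0, e1, e2, e3, e4,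
    PySem.Set.contains_eq_listContains, List.contains, List.elem,
    pvEq0, pvEq1, pvEq2, pvEq3, pvEq4, pvEq5, pvEq6, pvEq7,
    pvEq8, pvEq9, pvEq10, pvEq11, pvEq12, pvEq13, pvEq14, pvEq15]
  generalize pvCode n = x at hx ⊢
  generalize PySem.Str.isIn "text" n = t
  generalize PySem.Str.isIn "image" n = i
  generalize PySem.Str.isIn "button" n = b
  revert t i b
  revert x
  decide

-- A's group loop, characterised by pvCode of both names
lemma pvLoop_eq (a b : String) :
    pvGroupLoop
      [PySem.Set.ofList ["Text", "Label", "Text Button", "Link"],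
       PySem.Set.ofList ["Image", "Background Image", "Background", "Icon"],
       PySem.Set.ofList ["Input Field", "Search Box", "Text Input"],
       PySem.Set.ofList ["Button", "Text Button", "Icon Button"],
       PySem.Set.ofList ["Other", "Unknown", "Misc"]] a b =
    !((pvLook (pvCode a)).inter (pvLook (pvCode b))).isEmpty := by
  have hx := pvCode_le a
  have hy := pvCode_le b
  have e0 : PySem.Set.ofList ((PySem.Set.ofList ["Text", "Label", "Text Button", "Link"]).map PySem.Str.lower) = ["text","label","text button","link"] := by decide
  have e1 : PySem.Set.ofList ((PySem.Set.ofList ["Image", "Background Image", "Background", "Icon"]).map PySem.Str.lower) = ["image","background image","background","icon"] := by decide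
  have e2 : PySem.Set.ofList ((PySem.Set.ofList ["Input Field", "Search Box", "Text Input"]).map PySem.Str.lower) = ["input field","search box","text input"] := by decide
  have e3 : PySem.Set.ofList ((PySem.Set.ofList ["Button", "Text Button", "Icon Button"]).map PySem.Str.lower) = ["button","text button","icon button"] := by decide
  have e4 : PySem.Set.ofList ((PySem.Set.ofList ["Other", "Unknown", "Misc"]).map PySem.Str.lower) = ["other","unknown","misc"] := by decide
  simp only [pvGroupLoop, e0, e1, e2, e3, e4, PySem.Set.contains_eq_listContains,
    List.contains, List.elem,
    pvEq0, pvEq1, pvEq2, pvEq3, pvEq4, pvEq5, pvEq6, pvEq7,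
    pvEq8, pvEq9, pvEq10, pvEq11, pvEq12, pvEq13, pvEq14, pvEq15]
  generalize pvCode a = x at hx ⊢
  generalize pvCode b = y at hy ⊢
  revert y
  revert x
  decide

-- ===== VERDICT (by name: the statement is the Claim_ definition above) =====
theorem are_similar_classes_spec : Claim_equal_are_similar_classes := by
  intro class1 class2 _
  unfold Spec_are_similar_classes
  simp only [are_similar_classes, are_similar_classes_alt]
  rw [pvFeatures_eq, pvFeatures_eq, pvLoop_eq]
  have hx := pvCode_le (PySem.Str.strip (PySem.Str.lower class1))
  have hy := pvCode_le (PySem.Str.strip (PySem.Str.lower class2))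
  generalize pvCode (PySem.Str.strip (PySem.Str.lower class1)) = x at hx ⊢
  generalize pvCode (PySem.Str.strip (PySem.Str.lower class2)) = y at hy ⊢
  generalize PySem.Str.isIn "text" (PySem.Str.strip (PySem.Str.lower class1)) = t1
  generalize PySem.Str.isIn "image" (PySem.Str.strip (PySem.Str.lower class1)) = i1
  generalize PySem.Str.isIn "button" (PySem.Str.strip (PySem.Str.lower class1)) = b1
  generalize PySem.Str.isIn "text" (PySem.Str.strip (PySem.Str.lower class2)) = t2
  generalize PySem.Str.isIn "image" (PySem.Str.strip (PySem.Str.lower class2)) = i2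
  generalize PySem.Str.isIn "button" (PySem.Str.strip (PySem.Str.lower class2)) = b2
  revert t1 i1 b1 t2 i2 b2
  revert y
  revert x
  decide
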